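-- pv_equiv track=rewrite | github.com/penguinc00kies/CSC110-Jamie | csc110/assignments/a4/a4_part4.py | ciphertext_to_grid
-- ===== SOURCE A (Python) =====
-- def ciphertext_to_grid(k: int, ciphertext: str) -> list[list[str]]:
--     """Return the grid corresponding to the given ciphertext.
--
--     Note that this grid should be the one that is used to generate the ciphertext.
--
--     Preconditions:
--         - k >= 1
--         - len(ciphertext) % k == 0
--         - ciphertext != ''
--     """
--     grid = []
--     c = len(ciphertext) // k
--     for i in range(0, c):
--         row = []
--         for j in range(0, len(ciphertext)):
--             if j % c == i:
--                 row.append(ciphertext[j])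
--         grid.append(row)
--
--     return grid
-- ===== SOURCE B (Python) =====
-- def ciphertext_to_grid(k: int, ciphertext: str) -> list[list[str]]:
--     c = len(ciphertext) // k
--     if c <= 0:
--         return []
--     grid = [[] for _ in range(c)]
--     for idx, ch in enumerate(ciphertext):
--         grid[idx % c].append(ch)
--     return grid
-- ===== Notes on version B (the rewrite author's own statement) =====
-- stated objective: faster
-- what changed: Replaces A's c nested filtered scans of the whole ciphertext (one per row) with a single distributing pass that routes each character to row idx % c.
import Mathlib
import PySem

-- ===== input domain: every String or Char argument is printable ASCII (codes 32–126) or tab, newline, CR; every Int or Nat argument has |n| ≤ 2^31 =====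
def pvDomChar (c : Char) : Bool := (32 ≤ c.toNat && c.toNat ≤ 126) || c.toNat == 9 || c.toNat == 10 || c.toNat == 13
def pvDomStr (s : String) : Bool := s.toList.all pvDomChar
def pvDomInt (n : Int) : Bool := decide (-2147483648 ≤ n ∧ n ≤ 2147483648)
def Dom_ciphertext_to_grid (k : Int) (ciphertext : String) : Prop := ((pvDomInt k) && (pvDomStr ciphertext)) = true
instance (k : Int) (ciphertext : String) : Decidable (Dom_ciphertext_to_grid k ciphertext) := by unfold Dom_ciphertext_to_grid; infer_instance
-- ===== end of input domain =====

-- B replaces A's c nested filtered scans of the ciphertext (one per row) with a single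
-- distributing pass routing each character to row idx % c (objective: faster, O(n) vs O(n*c)).


-- ===== PORT A =====
def ciphertext_to_grid (k : Int) (ciphertext : String) : List (List String) :=
  let s := ciphertext.toList
  let c := PySem.Int.floordiv (s.length : Int) k
  (PySem.List.pyRange 0 c 1).foldl
    (fun grid i =>
      grid ++ [ (PySem.List.pyRange 0 (s.length : Int) 1).foldl
        (fun row j =>
          if PySem.Int.mod j c == i then row ++ [String.ofList [PySem.List.pyGetD s j ' ']] else row)
        [] ])
    []

-- ===== PORT B =====
def ciphertext_to_grid_alt (k : Int) (ciphertext : String) : List (List String) :=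
  let s := ciphertext.toList
  let c := PySem.Int.floordiv (s.length : Int) k
  if c ≤ 0 then []
  else
    (PySem.List.enumerate s 0).foldl
      (fun g p => g.modify (PySem.Int.mod p.1 c).toNat (fun row => row ++ [String.ofList [p.2]]))
      (List.replicate c.toNat [])

-- ===== PRECONDITION & SPEC =====
-- Pre_: k ≠ 0 — at k = 0 Python's len(ciphertext) // k raises ZeroDivisionError in both A and B.
def Pre_ciphertext_to_grid (k : Int) (ciphertext : String) : Prop := k ≠ 0
instance (k : Int) (ciphertext : String) : Decidable (Pre_ciphertext_to_grid k ciphertext) := by unfold Pre_ciphertext_to_grid; infer_instance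
def pvWitness_ciphertext_to_grid : Int × String := (2, "abcdef")
def Spec_ciphertext_to_grid (k : Int) (ciphertext : String) (out : List (List String)) : Prop := out = ciphertext_to_grid_alt k ciphertext
instance (k : Int) (ciphertext : String) (out : List (List String)) : Decidable (Spec_ciphertext_to_grid k ciphertext out) := by unfold Spec_ciphertext_to_grid; infer_instance

-- ===== CLAIM (what is proved, stated in full; the proofs are below) =====
def Claim_equal_ciphertext_to_grid : Prop := ∀ (k : Int) (ciphertext : String), Dom_ciphertext_to_grid k ciphertext → Pre_ciphertext_to_grid k ciphertext → Spec_ciphertext_to_grid k ciphertext (ciphertext_to_grid k ciphertext)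

-- ===== LEMMAS AND PROOFS =====

-- common characterisation: row i holds the characters at positions ≡ i (mod c), left to right
def rowsOf (c : Nat) (s : List Char) : List (List String) :=
  (List.range c).map
    (fun i => ((List.range s.length).filter (fun j => j % c == i)).map (fun j => String.ofList [s.getD j ' ']))

lemma pyRange_one_nonpos (c : Int) (h : c ≤ 0) : PySem.List.pyRange 0 c 1 = [] := by
  simp [PySem.List.pyRange, h]

lemma A_eq_rowsOf (cn : Nat) (s : List Char) :
    (PySem.List.pyRange 0 (cn : Int) 1).foldl
      (fun grid i =>
        grid ++ [ (PySem.List.pyRange 0 (s.length : Int) 1).foldl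
          (fun row j =>
            if PySem.Int.mod j (cn : Int) == i then row ++ [String.ofList [PySem.List.pyGetD s j ' ']] else row)
          [] ])
      [] = rowsOf cn s := by
  rw [PySem.List.pyRange_zero_natCast cn, PySem.List.pyRange_zero_natCast s.length,
      PySem.List.foldl_append_singleton_eq_map]
  rw [List.nil_append, List.map_map, rowsOf]
  apply List.map_congr_left
  intro i _
  rw [Function.comp_apply, PySem.List.foldl_append_if, List.nil_append, List.filter_map,
      List.map_map]
  have hp : ((fun j : Int => PySem.Int.mod j (cn : Int) == (i : Int)) ∘ (fun k : Nat => (k : Int)))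
      = (fun j : Nat => j % cn == i) := by
    funext j
    simp only [Function.comp_apply, PySem.Int.mod_natCast]
    cases h : (j % cn == i) <;> simp_all <;> omega
  rw [hp]
  apply List.map_congr_left
  intro j _
  simp

lemma rowsOf_append (cn : Nat) (t : List Char) (a : Char) :
    rowsOf cn (t ++ [a]) = (rowsOf cn t).modify (t.length % cn) (fun row => row ++ [String.ofList [a]]) := by
  apply List.ext_getElem
  · simp [rowsOf]
  · intro i h1 h2
    rw [List.getElem_modify]
    simp only [rowsOf, List.getElem_map, List.getElem_range, List.length_append,
      List.length_singleton, List.range_succ, List.filter_append, List.map_append,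
      List.filter_singleton]
    have hmap : ((List.range t.length).filter (fun j => j % cn == i)).map
        (fun j => String.ofList [(t ++ [a]).getD j ' ']) =
        ((List.range t.length).filter (fun j => j % cn == i)).map
        (fun j => String.ofList [t.getD j ' ']) := by
      apply List.map_congr_left
      intro j hj
      have : j < t.length := List.mem_range.mp (List.mem_filter.mp hj).1
      rw [List.getD_append t [a] ' ' j this]
    rw [hmap]
    by_cases hm : t.length % cn = i
    · simp [hm, List.getD]
    · have hb : (t.length % cn == i) = false := by simp [hm]
      simp [hb, hm]

lemma B_eq_rowsOf (cn : Nat) (s : List Char) :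
    (PySem.List.enumerate s 0).foldl
      (fun g p => g.modify (PySem.Int.mod p.1 (cn : Int)).toNat (fun row => row ++ [String.ofList [p.2]]))
      (List.replicate cn []) = rowsOf cn s := by
  induction s using List.reverseRecOn with
  | nil => simp [rowsOf, List.map_const']
  | append_singleton t a ih =>
      rw [PySem.List.enumerate_append, List.foldl_append, ih]
      simp only [PySem.List.enumerate_cons, PySem.List.enumerate_nil, List.foldl_cons,
        List.foldl_nil]
      have hidx : (PySem.Int.mod (0 + (t.length : Int)) (cn : Int)).toNat = t.length % cn := by
        rw [zero_add, PySem.Int.mod_natCast, Int.toNat_natCast]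
      rw [hidx, rowsOf_append]

lemma both_eq (c : Int) (s : List Char) :
    (PySem.List.pyRange 0 c 1).foldl
      (fun grid i =>
        grid ++ [ (PySem.List.pyRange 0 (s.length : Int) 1).foldl
          (fun row j =>
            if PySem.Int.mod j c == i then row ++ [String.ofList [PySem.List.pyGetD s j ' ']] else row)
          [] ])
      [] =
    (if c ≤ 0 then []
     else
      (PySem.List.enumerate s 0).foldl
        (fun g p => g.modify (PySem.Int.mod p.1 c).toNat (fun row => row ++ [String.ofList [p.2]]))
        (List.replicate c.toNat [])) := by
  by_cases hc : c ≤ 0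
  · rw [if_pos hc, pyRange_one_nonpos c hc]; rfl
  · rw [if_neg hc]
    obtain ⟨cn, rfl⟩ : ∃ cn : Nat, c = (cn : Int) :=
      ⟨c.toNat, (Int.toNat_of_nonneg (by omega)).symm⟩
    rw [A_eq_rowsOf, Int.toNat_natCast, B_eq_rowsOf]

-- ===== VERDICT (by name: the statement is the Claim_ definition above) =====
theorem ciphertext_to_grid_spec : Claim_equal_ciphertext_to_grid := by
  intro k ct _ hk
  unfold Spec_ciphertext_to_grid ciphertext_to_grid ciphertext_to_grid_alt
  exact both_eq (PySem.Int.floordiv (ct.toList.length : Int) k) ct.toList
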